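-- pv_equiv track=rewrite | github.com/zhang403/MoRFs_TransFuse | case.py | find_overlapping_regions
-- ===== SOURCE A (Python) =====
-- def find_overlapping_regions(true_arr, pred_arr):
--     overlapping = []
--     start = None
--     seq_len = len(true_arr)
--
--     for i in range(seq_len):
--         if true_arr[i] == 1 and pred_arr[i] == 1:
--             if start is None:
--                 start = i
--         else:
--             if start is not None:
--                 end = i - 1
--                 overlapping.append((start, end, end - start + 1))
--                 start = None
--
--     if start is not None:
--         end = seq_len - 1
--         overlapping.append((start, end, end - start + 1))
--
--     return overlapping
-- ===== SOURCE B (Python) =====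
-- def find_overlapping_regions(true_arr, pred_arr):
--     n = len(true_arr)
--     m = [true_arr[i] == 1 and pred_arr[i] == 1 for i in range(n)]
--     starts = [i for i in range(n) if m[i] and (i == 0 or not m[i - 1])]
--     ends = [i for i in range(n) if m[i] and (i == n - 1 or not m[i + 1])]
--     return [(s, e, e - s + 1) for s, e in zip(starts, ends)]
-- ===== Notes on version B (the rewrite author's own statement) =====
-- stated objective: alternative
-- what changed: Replaces A's sequential start/flush state machine with a stateless mask-then-boundary pass: build the combined mask, collect region starts (mask true, predecessor false) and region ends (mask true, successor false) as two filters, and zip them into triples.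
import Mathlib
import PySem

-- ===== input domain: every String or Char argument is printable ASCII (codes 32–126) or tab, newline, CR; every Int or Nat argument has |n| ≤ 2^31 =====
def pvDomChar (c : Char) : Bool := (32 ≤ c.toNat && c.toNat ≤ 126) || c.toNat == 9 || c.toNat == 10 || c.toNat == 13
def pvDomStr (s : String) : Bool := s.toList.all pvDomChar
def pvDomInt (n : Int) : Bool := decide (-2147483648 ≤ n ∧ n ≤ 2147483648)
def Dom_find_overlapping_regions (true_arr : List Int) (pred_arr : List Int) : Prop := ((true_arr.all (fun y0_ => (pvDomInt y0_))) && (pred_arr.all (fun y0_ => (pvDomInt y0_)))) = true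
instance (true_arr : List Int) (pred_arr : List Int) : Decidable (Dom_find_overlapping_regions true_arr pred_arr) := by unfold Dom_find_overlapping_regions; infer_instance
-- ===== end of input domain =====

-- B replaces A's start/flush state machine with a stateless mask + boundary-filter + zip pass (same cost, different decomposition).

-- ===== PORT A =====
def find_overlapping_regions (true_arr : List Int) (pred_arr : List Int) : List (Int × Int × Int) :=
  let seq_len := true_arr.length
  let r := (List.range seq_len).foldl
    (fun (s : List (Int × Int × Int) × Option Nat) i =>
      if (true_arr.getD i 0 == 1) && (pred_arr.getD i 0 == 1) then
        match s.2 with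
        | none => (s.1, some i)
        | some _ => s
      else
        match s.2 with
        | none => s
        | some st => (s.1 ++ [((st : Int), (i : Int) - 1, ((i : Int) - 1) - st + 1)], none))
    ([], none)
  match r.2 with
  | none => r.1
  | some st => r.1 ++ [((st : Int), (seq_len : Int) - 1, ((seq_len : Int) - 1) - st + 1)]

-- ===== PORT B =====
def find_overlapping_regions_alt (true_arr : List Int) (pred_arr : List Int) : List (Int × Int × Int) :=
  let n := true_arr.length
  let m := (List.range n).map (fun i => (true_arr.getD i 0 == 1) && (pred_arr.getD i 0 == 1))
  let starts := (List.range n).filter (fun i => m.getD i false && ((i == 0) || !(m.getD (i - 1) false)))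
  let ends := (List.range n).filter (fun i => m.getD i false && ((i == n - 1) || !(m.getD (i + 1) false)))
  (starts.zip ends).map (fun se => ((se.1 : Int), (se.2 : Int), (se.2 : Int) - (se.1 : Int) + 1))

-- ===== PRECONDITION & SPEC =====
-- Pre_ excludes exactly the inputs on which the Python A raises IndexError: some index i with
-- true_arr[i] == 1 lies beyond the end of pred_arr (the `and` short-circuits otherwise).
def Pre_find_overlapping_regions (true_arr : List Int) (pred_arr : List Int) : Prop :=
  ∀ i < true_arr.length, true_arr.getD i 0 = 1 → i < pred_arr.length
instance (true_arr : List Int) (pred_arr : List Int) : Decidable (Pre_find_overlapping_regions true_arr pred_arr) := by unfold Pre_find_overlapping_regions; infer_instance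
def pvWitness_find_overlapping_regions : List Int × List Int := ([1, 0, 1, 1], [1, 1, 1, 1])
def Spec_find_overlapping_regions (true_arr : List Int) (pred_arr : List Int) (out : List (Int × Int × Int)) : Prop := out = find_overlapping_regions_alt true_arr pred_arr
instance (true_arr : List Int) (pred_arr : List Int) (out : List (Int × Int × Int)) : Decidable (Spec_find_overlapping_regions true_arr pred_arr out) := by unfold Spec_find_overlapping_regions; infer_instance

-- ===== CLAIM (what is proved, stated in full; the proofs are below) =====
def Claim_equal_find_overlapping_regions : Prop := ∀ (true_arr : List Int) (pred_arr : List Int), Dom_find_overlapping_regions true_arr pred_arr → Pre_find_overlapping_regions true_arr pred_arr → Spec_find_overlapping_regions true_arr pred_arr (find_overlapping_regions true_arr pred_arr)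

-- ===== LEMMAS AND PROOFS =====

-- A's per-step function, abstracted over the combined-mask predicate c.
def pvStep (c : Nat → Bool) (s : List (Int × Int × Int) × Option Nat) (i : Nat) :
    List (Int × Int × Int) × Option Nat :=
  if c i then
    match s.2 with
    | none => (s.1, some i)
    | some _ => s
  else
    match s.2 with
    | none => s
    | some st => (s.1 ++ [((st : Int), (i : Int) - 1, ((i : Int) - 1) - st + 1)], none)

-- the state (pending start) after processing indices < n
def pvStt (c : Nat → Bool) : Nat → Option Nat
  | 0 => none
  | n + 1 => if c n then (match pvStt c n with | none => some n | some s => some s) else none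

-- the accumulator after processing indices < n
def pvAcc (c : Nat → Bool) : Nat → List (Int × Int × Int)
  | 0 => []
  | n + 1 =>
    if c n then pvAcc c n
    else
      match pvStt c n with
      | none => pvAcc c n
      | some st => pvAcc c n ++ [((st : Int), (n : Int) - 1, ((n : Int) - 1) - st + 1)]

-- region starts among indices < n
def pvS (c : Nat → Bool) (n : Nat) : List Nat :=
  (List.range n).filter (fun i => c i && ((i == 0) || !c (i - 1)))
-- interior region ends among indices < n (successor is false; n itself never counted)
def pvF (c : Nat → Bool) (n : Nat) : List Nat :=
  (List.range n).filter (fun i => c i && !c (i + 1))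
def pvf (se : Nat × Nat) : Int × Int × Int := ((se.1 : Int), (se.2 : Int), (se.2 : Int) - (se.1 : Int) + 1)

theorem pvFold_eq (c : Nat → Bool) (n : Nat) :
    (List.range n).foldl (pvStep c) ([], none) = (pvAcc c n, pvStt c n) := by
  induction n with
  | zero => rfl
  | succ n ih =>
    rw [List.range_succ, List.foldl_append, ih]
    simp only [List.foldl_cons, List.foldl_nil]
    cases hc : c n <;> cases hst : pvStt c n <;>
      simp [pvStep, pvAcc, pvStt, hc, hst]

theorem pvStt_none (c : Nat → Bool) (n : Nat) (h : pvStt c n = none) :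
    n = 0 ∨ c (n - 1) = false := by
  cases n with
  | zero => exact Or.inl rfl
  | succ m =>
    right
    unfold pvStt at h
    cases hc : c m
    · simpa using hc
    · rw [hc] at h; simp at h; cases hst : pvStt c m <;> rw [hst] at h <;> simp at h

theorem pvSstep (c : Nat → Bool) (n : Nat) :
    pvS c (n + 1) = pvS c n ++ (if c n && ((n == 0) || !c (n - 1)) then [n] else []) := by
  unfold pvS
  rw [List.range_succ, List.filter_append]
  congr 1
  cases h : (c n && ((n == 0) || !c (n - 1))) <;> simp [List.filter, h]

theorem pvFdelta (c : Nat → Bool) (n : Nat) :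
    pvF c n = pvF c (n - 1) ++ (if c (n - 1) && !c n then [n - 1] else []) := by
  cases n with
  | zero =>
    simp only [Nat.zero_sub, pvF, List.range_zero, List.filter_nil]
    cases h : c 0 <;> simp [h]
  | succ m =>
    unfold pvF
    rw [List.range_succ, List.filter_append]
    simp only [Nat.add_sub_cancel]
    congr 1
    cases h : (c m && !c (m + 1)) <;> simp [List.filter, h]

-- the invariant tying A's fold state to the boundary lists
theorem pvInv (c : Nat → Bool) (n : Nat) :
    (pvStt c n = none →
      (pvS c n).length = (pvF c (n - 1)).length ∧
      pvAcc c n = ((pvS c n).zip (pvF c (n - 1))).map pvf) ∧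
    (∀ s, pvStt c n = some s →
      0 < n ∧ c (n - 1) = true ∧
      ∃ s', pvS c n = s' ++ [s] ∧ s'.length = (pvF c (n - 1)).length ∧
        pvAcc c n = (s'.zip (pvF c (n - 1))).map pvf) := by
  induction n with
  | zero =>
    constructor
    · intro _; exact ⟨rfl, rfl⟩
    · intro s h; simp [pvStt] at h
  | succ n ih =>
    have hS := pvSstep c n
    have hF := pvFdelta c n
    simp only [Nat.add_sub_cancel]
    cases hc : c n with
    | true =>
      cases hst : pvStt c n with
      | none =>
        obtain ⟨hlen, hacc⟩ := ih.1 hst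
        have hcond : n = 0 ∨ c (n - 1) = false := pvStt_none c n hst
        have hcondF : (c (n - 1) && !c n) = false := by
          rcases hcond with h0 | hf
          · subst h0; cases h : c 0 <;> simp [h, hc]
          · simp [hf]
        have hF' : pvF c n = pvF c (n - 1) := by rw [hF, hcondF]; simp
        have hcondS : (c n && ((n == 0) || !c (n - 1))) = true := by
          rcases hcond with h0 | hf
          · subst h0; simp [hc]
          · simp [hc, hf]
        constructor
        · intro h; exfalso; unfold pvStt at h; rw [hc, hst] at h; simp at h
        · intro s h
          unfold pvStt at h; rw [hc, hst] at h; simp at h; subst h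
          refine ⟨Nat.succ_pos n, by simpa using hc, pvS c n, ?_, ?_, ?_⟩
          · rw [hS, hcondS]; simp
          · simpa [hF'] using hlen
          · unfold pvAcc; rw [hc]; simpa [hF'] using hacc
      | some s0 =>
        obtain ⟨hpos, hcm, s', hSsplit, hlen, hacc⟩ := ih.2 s0 hst
        have hcondF : (c (n - 1) && !c n) = false := by simp [hc]
        have hF' : pvF c n = pvF c (n - 1) := by rw [hF, hcondF]; simp
        have hcondS : (c n && ((n == 0) || !c (n - 1))) = false := by
          have : (n == 0) = false := by simp [Nat.pos_iff_ne_zero.mp hpos]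
          simp [this, hcm]
        have hS' : pvS c (n + 1) = pvS c n := by rw [hS, hcondS]; simp
        constructor
        · intro h; exfalso; unfold pvStt at h; rw [hc, hst] at h; simp at h
        · intro s h
          unfold pvStt at h; rw [hc, hst] at h; simp at h; subst h
          refine ⟨Nat.succ_pos n, by simpa using hc, s', ?_, ?_, ?_⟩
          · rw [hS', hSsplit]
          · simpa [hF'] using hlen
          · unfold pvAcc; rw [hc]; simpa [hF'] using hacc
    | false =>
      have hstt : pvStt c (n + 1) = none := by simp [pvStt, hc]
      constructor
      · intro _
        cases hst : pvStt c n with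
        | none =>
          obtain ⟨hlen, hacc⟩ := ih.1 hst
          have hcond : n = 0 ∨ c (n - 1) = false := pvStt_none c n hst
          have hcondF : (c (n - 1) && !c n) = false := by
            rcases hcond with h0 | hf
            · subst h0; simpa using hc
            · simp [hf]
          have hF' : pvF c n = pvF c (n - 1) := by rw [hF, hcondF]; simp
          have hS' : pvS c (n + 1) = pvS c n := by rw [hS]; simp [hc]
          constructor
          · rw [hS', hF']; simpa using hlen
          · unfold pvAcc; rw [hc, hst, hS', hF']; simpa using hacc
        | some s0 =>
          obtain ⟨hpos, hcm, s', hSsplit, hlen, hacc⟩ := ih.2 s0 hst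
          have hF' : pvF c n = pvF c (n - 1) ++ [n - 1] := by
            rw [hF]; simp [hcm, hc]
          have hS' : pvS c (n + 1) = s' ++ [s0] := by rw [hS, hSsplit]; simp [hc]
          have hzip : ((s' ++ [s0]).zip (pvF c (n - 1) ++ [n - 1])) =
              s'.zip (pvF c (n - 1)) ++ [(s0, n - 1)] := by
            rw [List.zip_append hlen]; rfl
          have hcast : ((n : Int) - 1) = ((n - 1 : Nat) : Int) := by
            omega
          constructor
          · rw [hS', hF']; simp [← hlen]
          · unfold pvAcc
            rw [hc, hst, hS', hF', hzip, List.map_append, hacc]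
            simp [pvf, hcast]
      · intro s h; rw [hstt] at h; simp at h

-- B's filters, rewritten over the predicate c.
theorem pv_getD_map_range (c : Nat → Bool) (n i : Nat) (h : i < n) :
    ((List.range n).map c).getD i false = c i := by
  rw [List.getD_eq_getElem?_getD]
  simp [h]

theorem pvStarts_eq (c : Nat → Bool) (n : Nat) :
    (List.range n).filter
      (fun i => ((List.range n).map c).getD i false &&
        ((i == 0) || !(((List.range n).map c).getD (i - 1) false))) = pvS c n := by
  apply List.filter_congr
  intro i hi
  have hi' : i < n := List.mem_range.mp hi
  rw [pv_getD_map_range c n i hi', pv_getD_map_range c n (i - 1) (by omega)]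

theorem pvEnds_eq (c : Nat → Bool) (n : Nat) :
    (List.range n).filter
      (fun i => ((List.range n).map c).getD i false &&
        ((i == n - 1) || !(((List.range n).map c).getD (i + 1) false))) =
    pvF c (n - 1) ++ (if c (n - 1) && decide (0 < n) then [n - 1] else []) := by
  cases n with
  | zero => simp [pvF]
  | succ m =>
    simp only [Nat.add_sub_cancel]
    have h0 : (List.range (m + 1)).filter
        (fun i => ((List.range (m + 1)).map c).getD i false &&
          ((i == m) || !(((List.range (m + 1)).map c).getD (i + 1) false))) =
        (List.range (m + 1)).filter (fun i => c i && ((i == m) || !c (i + 1))) := by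
      apply List.filter_congr
      intro i hi
      have hi' : i < m + 1 := List.mem_range.mp hi
      by_cases him : i = m
      · rw [him, pv_getD_map_range c (m + 1) m (by omega)]
        simp
      · have : i < m := by omega
        rw [pv_getD_map_range c (m + 1) i (by omega),
          pv_getD_map_range c (m + 1) (i + 1) (by omega)]
    rw [h0, List.range_succ, List.filter_append]
    have h1 : (List.range m).filter (fun i => c i && ((i == m) || !c (i + 1))) = pvF c m := by
      apply List.filter_congr
      intro i hi
      have hi' : i < m := List.mem_range.mp hi
      have : (i == m) = false := by simp; omega
      rw [this]
      simp
    rw [h1]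
    cases hm : c m <;> simp [hm]

-- ===== VERDICT (by name: the statement is the Claim_ definition above) =====
theorem find_overlapping_regions_spec : Claim_equal_find_overlapping_regions := by
  intro true_arr pred_arr _ _
  unfold Spec_find_overlapping_regions find_overlapping_regions find_overlapping_regions_alt
  dsimp only
  set c : Nat → Bool := fun i => (true_arr.getD i 0 == 1) && (pred_arr.getD i 0 == 1) with hc
  set n := true_arr.length with hn
  rw [show ((fun (s : List (Int × Int × Int) × Option Nat) i =>
      if (true_arr.getD i 0 == 1) && (pred_arr.getD i 0 == 1) then
        match s.2 with
        | none => (s.1, some i)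
        | some _ => s
      else
        match s.2 with
        | none => s
        | some st => (s.1 ++ [((st : Int), (i : Int) - 1, ((i : Int) - 1) - st + 1)], none)) :
      List (Int × Int × Int) × Option Nat → Nat → List (Int × Int × Int) × Option Nat) = pvStep c
    from rfl]
  rw [pvFold_eq c n, pvStarts_eq c n, pvEnds_eq c n]
  cases hst : pvStt c n with
  | none =>
    obtain ⟨hlen, hacc⟩ := (pvInv c n).1 hst
    have hcond : (c (n - 1) && decide (0 < n)) = false := by
      rcases pvStt_none c n hst with h0 | hf
      · simp [h0]
      · simp [hf]
    show pvAcc c n = _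
    rw [hcond]
    simpa [pvf] using hacc
  | some s =>
    obtain ⟨hpos, hcm, s', hSsplit, hlen, hacc⟩ := (pvInv c n).2 s hst
    have hcond : (c (n - 1) && decide (0 < n)) = true := by simp [hcm, hpos]
    have hends : (if (c (n - 1) && decide (0 < n)) = true then [n - 1] else []) = [n - 1] := by
      simp [hcond]
    have hzip : ((s' ++ [s]).zip (pvF c (n - 1) ++ [n - 1])) =
        s'.zip (pvF c (n - 1)) ++ [(s, n - 1)] := by
      rw [List.zip_append hlen]; rfl
    have hcast : ((n : Int) - 1) = ((n - 1 : Nat) : Int) := by omega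
    show pvAcc c n ++ _ = _
    rw [hends, hSsplit, hzip, List.map_append, hacc]
    simp [pvf, hcast]
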